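-- pv_equiv track=rewrite | github.com/lizaconst/RandomSections | randsec/funcs.py | extract_and_trim_dict
-- ===== SOURCE A (Python) =====
-- def extract_and_trim_dict(dictionary):
--     keys = []
--     values = []
--     for key, value in dictionary.items():
--         keys.append(key)
--         values.append(value)
--
--     # Обрезаем конец списков, пока последний элемент не равен 0.0
--     while values and values[-1] == 0.0:
--         del keys[-1]
--         del values[-1]
--     return keys, values
-- ===== SOURCE B (Python) =====
-- def extract_and_trim_dict(dictionary):
--     keys = list(dictionary.keys())
--     values = list(dictionary.values())
--     cut = len(values)
--     while cut > 0 and values[cut - 1] == 0.0: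
--         cut -= 1
--     return keys[:cut], values[:cut]
-- ===== Notes on version B (the rewrite author's own statement) =====
-- stated objective: simpler
-- what changed: Replaces the repeated del-from-both-lists mutation loop with a single backward index scan computing a cut point, then one slice of each list.
import Mathlib
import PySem

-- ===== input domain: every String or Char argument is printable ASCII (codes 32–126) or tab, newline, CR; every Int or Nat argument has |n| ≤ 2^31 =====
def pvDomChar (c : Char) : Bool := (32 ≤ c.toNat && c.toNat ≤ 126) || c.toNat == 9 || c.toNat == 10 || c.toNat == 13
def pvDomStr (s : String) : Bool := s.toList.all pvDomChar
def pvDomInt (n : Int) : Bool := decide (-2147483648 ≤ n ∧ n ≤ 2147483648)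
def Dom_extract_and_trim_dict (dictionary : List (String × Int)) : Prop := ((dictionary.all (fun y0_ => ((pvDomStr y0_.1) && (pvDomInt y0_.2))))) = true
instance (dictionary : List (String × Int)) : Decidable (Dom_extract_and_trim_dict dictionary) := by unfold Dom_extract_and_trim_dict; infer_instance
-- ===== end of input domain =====

-- B replaces A's repeated del-from-both-lists loop by one backward cut-index scan plus slicing (simpler).

-- ===== PORT A =====
-- the while loop: while values and values[-1] == 0.0: del keys[-1]; del values[-1]
def pvATrim (ks : List String) (vs : List Int) : List String × List Int :=
  match h : vs.getLast? with
  | some v => if v = 0 then pvATrim ks.dropLast vs.dropLast else (ks, vs)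
  | none => (ks, vs)
termination_by vs.length
decreasing_by
  have hne : vs ≠ [] := by intro he; subst he; simp at h
  have hpos : 0 < vs.length := List.length_pos_of_ne_nil hne
  simp [List.length_dropLast]
  omega

def extract_and_trim_dict (dictionary : List (String × Int)) : List String × List Int :=
  -- for key, value in dictionary.items(): keys.append(key); values.append(value)
  let keys := dictionary.foldl (fun acc kv => acc ++ [kv.1]) []
  let values := dictionary.foldl (fun acc kv => acc ++ [kv.2]) []
  pvATrim keys values

-- ===== PORT B =====
-- while cut > 0 and values[cut-1] == 0.0: cut -= 1   (index cut-1 is always in range, so getD is exact)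
def pvBCut (vs : List Int) (cut : Nat) : Nat :=
  if cut > 0 then
    if vs.getD (cut - 1) 0 = 0 then pvBCut vs (cut - 1) else cut
  else cut

def extract_and_trim_dict_alt (dictionary : List (String × Int)) : List String × List Int :=
  let keys := dictionary.map Prod.fst
  let values := dictionary.map Prod.snd
  let cut := pvBCut values values.length
  (keys.take cut, values.take cut)

-- ===== PRECONDITION & SPEC =====
def Spec_extract_and_trim_dict (dictionary : List (String × Int)) (out : List String × List Int) : Prop := out = extract_and_trim_dict_alt dictionary
instance (dictionary : List (String × Int)) (out : List String × List Int) : Decidable (Spec_extract_and_trim_dict dictionary out) := by unfold Spec_extract_and_trim_dict; infer_instance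

-- ===== CLAIM (what is proved, stated in full; the proofs are below) =====
def Claim_equal_extract_and_trim_dict : Prop := ∀ (dictionary : List (String × Int)), Dom_extract_and_trim_dict dictionary → Spec_extract_and_trim_dict dictionary (extract_and_trim_dict dictionary)

-- ===== LEMMAS AND PROOFS =====
theorem pvBCut_le (vs : List Int) (n : Nat) : pvBCut vs n ≤ n := by
  induction n with
  | zero => simp [pvBCut]
  | succ k ih =>
    rw [pvBCut]
    split_ifs with h1 h2
    · simpa using Nat.le_trans (by simpa using ih) (Nat.le_succ k)
    · exact le_refl _
    · exact le_refl _

theorem pvBCut_append (vs : List Int) (v : Int) (n : Nat) (hn : n ≤ vs.length) :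
    pvBCut (vs ++ [v]) n = pvBCut vs n := by
  induction n with
  | zero => simp [pvBCut]
  | succ k ih =>
    have hk : k < vs.length := hn
    have hg : (vs ++ [v]).getD k 0 = vs.getD k 0 := by
      simp [List.getD, List.getElem?_append_left hk]
    conv_lhs => rw [pvBCut]
    conv_rhs => rw [pvBCut]
    simp only [Nat.succ_sub_one, hg, Nat.succ_pos, if_pos]
    split_ifs with h2
    · exact ih (Nat.le_of_lt hk)
    · rfl

theorem pvATrim_eq (vs : List Int) : ∀ (ks : List String), ks.length = vs.length →
    pvATrim ks vs = (ks.take (pvBCut vs vs.length), vs.take (pvBCut vs vs.length)) := by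
  induction vs using List.reverseRecOn with
  | nil =>
    intro ks hk
    have : ks = [] := List.eq_nil_of_length_eq_zero (by simpa using hk)
    subst this
    rw [pvATrim]
    simp [pvBCut]
  | append_singleton vs' v ih =>
    intro ks hk
    have hksne : ks ≠ [] := by
      intro he; subst he; simp at hk
    obtain ⟨ks', k, rfl⟩ := ks.eq_nil_or_concat.resolve_left hksne
    simp only [List.concat_eq_append] at *
    have hlen : ks'.length = vs'.length := by simpa using hk
    rw [pvATrim]
    split
    next v1 h1 =>
      have hv1 : v = v1 := by simpa using h1
      subst hv1
      by_cases hv : v = 0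
      · subst hv
        simp only [List.dropLast_concat]
        rw [ih ks' hlen]
        have hcutlen : pvBCut (vs' ++ [(0:Int)]) (vs' ++ [(0:Int)]).length = pvBCut vs' vs'.length := by
          rw [List.length_append]
          rw [show vs'.length + [(0:Int)].length = vs'.length + 1 from rfl]
          rw [pvBCut]
          have hg : (vs' ++ [(0:Int)]).getD (vs'.length + 1 - 1) 0 = 0 := by
            simp [List.getD]
          simp only [Nat.succ_pos, if_pos, hg]
          simp only [Nat.add_sub_cancel]
          exact pvBCut_append vs' 0 vs'.length (le_refl _)
        rw [hcutlen]
        have hle : pvBCut vs' vs'.length ≤ vs'.length := pvBCut_le _ _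
        rw [if_pos trivial,
          List.take_append_of_le_length (l₂ := [k]) (by omega),
          List.take_append_of_le_length (l₂ := [(0:Int)]) (by omega)]
      · rw [if_neg hv]
        have hcut : pvBCut (vs' ++ [v]) (vs' ++ [v]).length = (vs' ++ [v]).length := by
          rw [List.length_append]
          rw [show vs'.length + [v].length = vs'.length + 1 from rfl]
          rw [pvBCut]
          have hg : (vs' ++ [v]).getD (vs'.length + 1 - 1) 0 = v := by
            simp [List.getD]
          simp [hv]
        rw [hcut,
          List.take_of_length_le (l := ks' ++ [k]) (by simp [hlen]),
          List.take_of_length_le (le_refl _)]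
    next h1 => simp at h1

theorem foldl_append_fst (dictionary : List (String × Int)) :
    dictionary.foldl (fun acc kv => acc ++ [kv.1]) [] = dictionary.map Prod.fst := by
  have h : ∀ (l : List (String × Int)) (acc : List String),
      l.foldl (fun acc kv => acc ++ [kv.1]) acc = acc ++ l.map Prod.fst := by
    intro l
    induction l with
    | nil => intro acc; simp
    | cons x xs ih => intro acc; simp [List.foldl, ih]
  simpa using h dictionary []

theorem foldl_append_snd (dictionary : List (String × Int)) :
    dictionary.foldl (fun acc kv => acc ++ [kv.2]) [] = dictionary.map Prod.snd := by
  have h : ∀ (l : List (String × Int)) (acc : List Int),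
      l.foldl (fun acc kv => acc ++ [kv.2]) acc = acc ++ l.map Prod.snd := by
    intro l
    induction l with
    | nil => intro acc; simp
    | cons x xs ih => intro acc; simp [List.foldl, ih]
  simpa using h dictionary []

-- ===== VERDICT (by name: the statement is the Claim_ definition above) =====
theorem extract_and_trim_dict_spec : Claim_equal_extract_and_trim_dict := by
  intro dictionary _
  unfold Spec_extract_and_trim_dict extract_and_trim_dict extract_and_trim_dict_alt
  simp only [foldl_append_fst, foldl_append_snd]
  exact pvATrim_eq (dictionary.map Prod.snd) (dictionary.map Prod.fst) (by simp)
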